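-- pv_equiv track=rewrite | github.com/sanek623/algo_and_structures_python | Lesson_4/1.py | numb_rec
-- ===== SOURCE A (Python) =====
-- def numb_rec(x, y, i):
--     """Рекурсия"""
--     if i == 0:
--         return y
--     if i > 0:
--         digit = x % 10
--         x = x // 10
--         y = y * 10 + digit
--         return numb_rec(x, y, i-1)
-- ===== SOURCE B (Python) =====
-- def numb_rec(x, y, i):
--     """Iterative: move i low digits of x onto y, one per loop step."""
--     for _ in range(i):
--         x, digit = divmod(x, 10)
--         y = y * 10 + digit
--     return y
-- ===== Notes on version B (the rewrite author's own statement) =====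
-- stated objective: simpler
-- what changed: Recursion replaced by one iterative for-loop over range(i) threading (x, y) with divmod; Pre_ excludes i < 0 (A returns None, no int) and i > 995, where A's recursion overruns CPython's default 1000-frame limit and raises RecursionError (the exact threshold, observed ~998, shifts by a few frames with the caller's stack depth, so a couple of returning inputs just below it are excluded).
-- outside the precondition, e.g. on numb_rec(-1, -1, -1): A returns None, B returns -1; on numb_rec(0, 0, 996): A returns 0, B returns 0
import Mathlib
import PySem

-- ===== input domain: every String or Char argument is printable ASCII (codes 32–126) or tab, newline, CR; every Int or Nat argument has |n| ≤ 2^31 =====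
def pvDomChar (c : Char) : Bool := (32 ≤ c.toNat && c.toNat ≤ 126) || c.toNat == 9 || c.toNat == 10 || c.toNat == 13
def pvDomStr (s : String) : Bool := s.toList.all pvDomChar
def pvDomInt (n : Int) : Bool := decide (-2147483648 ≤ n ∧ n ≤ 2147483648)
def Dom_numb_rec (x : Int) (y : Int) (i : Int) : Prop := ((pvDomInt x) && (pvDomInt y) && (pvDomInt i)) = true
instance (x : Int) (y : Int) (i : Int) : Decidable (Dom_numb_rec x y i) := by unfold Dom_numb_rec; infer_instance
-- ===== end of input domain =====

-- B replaces the recursion by a single iterative for-loop over range(i) (objective: simpler).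

-- ===== PORT A =====
-- literal transliteration of A's recursion; the i < 0 fall-through (Python returns
-- None, no Int) is excluded by Pre_numb_rec, the port returns 0 there
def numb_rec (x : Int) (y : Int) (i : Int) : Int :=
  if i = 0 then y
  else if i > 0 then
    numb_rec (PySem.Int.floordiv x 10) (y * 10 + PySem.Int.mod x 10) (i - 1)
  else 0
termination_by i.toNat
decreasing_by omega

-- ===== PORT B =====
-- port of Source B: for _ in range(i): x, digit = divmod(x, 10); y = y*10 + digit
def numb_rec_alt (x : Int) (y : Int) (i : Int) : Int :=
  ((List.range i.toNat).foldl
    (fun (s : Int × Int) (_ : Nat) =>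
      (PySem.Int.floordiv s.1 10, s.2 * 10 + PySem.Int.mod s.1 10)) (x, y)).2

-- ===== PRECONDITION & SPEC =====
-- Pre_ excludes i < 0, where Python A falls through all branches and returns None (no int
-- value), and i > 995, where A's recursion overruns CPython's default 1000-frame limit and
-- raises RecursionError (the exact threshold, observed ~998, shifts by a few frames with
-- the caller's stack depth, so a couple of returning inputs just below it are excluded).
def Pre_numb_rec (x : Int) (y : Int) (i : Int) : Prop := 0 ≤ i ∧ i ≤ 995
instance (x : Int) (y : Int) (i : Int) : Decidable (Pre_numb_rec x y i) := by unfold Pre_numb_rec; infer_instance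
def pvWitness_numb_rec : Int × Int × Int := (123, 0, 3)

def Spec_numb_rec (x : Int) (y : Int) (i : Int) (out : Int) : Prop := out = numb_rec_alt x y i
instance (x : Int) (y : Int) (i : Int) (out : Int) : Decidable (Spec_numb_rec x y i out) := by unfold Spec_numb_rec; infer_instance

-- ===== CLAIM (what is proved, stated in full; the proofs are below) =====
def Claim_equal_numb_rec : Prop := ∀ (x : Int) (y : Int) (i : Int), Dom_numb_rec x y i → Pre_numb_rec x y i → Spec_numb_rec x y i (numb_rec x y i)

-- ===== LEMMAS AND PROOFS =====

-- a fold over range that ignores the index is an iterate of the step function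
theorem foldl_range_const {α : Type} (g : α → α) (n : Nat) (s : α) :
    (List.range n).foldl (fun a _ => g a) s = g^[n] s := by
  induction n generalizing s with
  | zero => simp
  | succ m ih =>
      rw [List.range_succ_eq_map]
      simp only [List.foldl_cons, List.foldl_map]
      rw [ih, Function.iterate_succ_apply]

theorem numb_rec_eq_iterate (n : Nat) (x y : Int) :
    numb_rec x y (n : Int) =
      ((fun (s : Int × Int) =>
          (PySem.Int.floordiv s.1 10, s.2 * 10 + PySem.Int.mod s.1 10))^[n] (x, y)).2 := by
  induction n generalizing x y with
  | zero => simp [numb_rec]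
  | succ m ih =>
      rw [Function.iterate_succ_apply]
      rw [show ((m + 1 : Nat) : Int) = (m : Int) + 1 by push_cast; ring]
      rw [numb_rec]
      have h0 : ((m : Int) + 1 ≠ 0) := by omega
      have h1 : ((m : Int) + 1 > 0) := by omega
      simp only [h0, h1, if_true, if_false]
      rw [show (m : Int) + 1 - 1 = (m : Int) by ring]
      exact ih _ _

-- ===== VERDICT (by name: the statement is the Claim_ definition above) =====
theorem numb_rec_spec : Claim_equal_numb_rec := by
  intro x y i _ hpre
  have hi : 0 ≤ i := hpre.1
  unfold Spec_numb_rec numb_rec_alt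
  rw [foldl_range_const]
  obtain ⟨n, rfl⟩ := Int.eq_ofNat_of_zero_le hi
  rw [numb_rec_eq_iterate]
  simp
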